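-- pv_equiv track=rewrite | github.com/HishamKhalil1990/game-of-greed | game_of_greed/game_logic.py | calculated_sub
-- ===== SOURCE A (Python) =====
-- def calculated_sub(output,score):
--     for dice in output:
--         if dice[1] == 6:
--             if dice[0] == 1:
--                 score += 4000
--             else:
--                 score += dice[0]*400
--         elif dice[1] == 5:
--             if dice[0] == 1:
--                 score += 3000
--             else:
--                 score += dice[0]*300
--         elif dice[1] == 4:
--             if dice[0] == 1:
--                 score += 2000
--             else:
--                 score += dice[0]*200
--         elif dice[1] == 3:
--             if dice[0] == 1:
--                 score += 1000
--             else: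
--                 score += dice[0]*100
--         elif dice[1] == 2:
--             if dice[0] == 1:
--                 score += 200
--             elif dice[0] == 5:
--                 score += 100
--         elif dice[1] == 1:
--             if dice[0] == 1:
--                 score += 100
--             elif dice[0] == 5:
--                 score += 50
--     return score
-- ===== SOURCE B (Python) =====
-- def calculated_sub(output, score):
--     # Reduce each entry die by die on an explicit work stack: each iteration
--     # strips one die off the top entry and adds its marginal payout.
--     total = score
--     stack = list(output)
--     while stack:
--         n, c = stack.pop()
--         if 4 <= c <= 6:
--             total += 1000 if n == 1 else 100 * n
--             stack.append((n, c - 1))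
--         elif c == 3:
--             total += 1000 if n == 1 else 100 * n
--         elif c == 2:
--             total += 100 if n == 1 else 50 if n == 5 else 0
--             stack.append((n, 1))
--         elif c == 1:
--             total += 100 if n == 1 else 50 if n == 5 else 0
--     return total
-- ===== Notes on version B (the rewrite author's own statement) =====
-- stated objective: alternative
-- what changed: B processes an explicit work stack die-by-die: each iteration pops an entry, adds the marginal payout of ONE die (triple-unit for counts 4-6, single-die value for count 2) and pushes the entry back with count-1, instead of A's per-entry six-way count cascade with nested face checks.
import Mathlib
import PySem

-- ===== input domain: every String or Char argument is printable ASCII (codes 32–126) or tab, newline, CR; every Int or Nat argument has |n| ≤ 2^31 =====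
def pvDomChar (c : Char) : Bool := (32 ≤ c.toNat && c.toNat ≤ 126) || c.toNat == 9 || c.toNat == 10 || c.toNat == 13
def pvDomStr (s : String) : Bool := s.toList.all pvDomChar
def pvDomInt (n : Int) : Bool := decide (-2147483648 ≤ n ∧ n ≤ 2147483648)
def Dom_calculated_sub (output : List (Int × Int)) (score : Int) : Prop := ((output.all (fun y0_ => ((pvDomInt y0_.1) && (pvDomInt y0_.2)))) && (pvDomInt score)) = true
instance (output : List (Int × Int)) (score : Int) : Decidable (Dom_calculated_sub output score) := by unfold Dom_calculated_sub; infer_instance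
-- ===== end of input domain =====

-- B reduces each entry die-by-die on an explicit work stack (one marginal payout per iteration) instead of A's six-way count cascade; same cost, alternative algorithm.


-- ===== PORT A =====
-- A's loop body: six-way cascade on dice[1], nested test on dice[0]
def pvStepA (score : Int) (dice : Int × Int) : Int :=
  if dice.2 = 6 then
    if dice.1 = 1 then score + 4000 else score + dice.1 * 400
  else if dice.2 = 5 then
    if dice.1 = 1 then score + 3000 else score + dice.1 * 300
  else if dice.2 = 4 then
    if dice.1 = 1 then score + 2000 else score + dice.1 * 200
  else if dice.2 = 3 then
    if dice.1 = 1 then score + 1000 else score + dice.1 * 100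
  else if dice.2 = 2 then
    if dice.1 = 1 then score + 200 else if dice.1 = 5 then score + 100 else score
  else if dice.2 = 1 then
    if dice.1 = 1 then score + 100 else if dice.1 = 5 then score + 50 else score
  else score

-- literal transliteration of A: fold the cascade body over output
def calculated_sub (output : List (Int × Int)) (score : Int) : Int :=
  output.foldl pvStepA score

-- ===== PORT B =====
-- termination measure for the work-stack loop: each entry weighs 1 + its count clamped to [0,6]
def pvWeight (p : Int × Int) : Nat := 1 + (min p.2 6).toNat

-- B's while-loop: pop an entry, add the marginal payout of ONE die, push the entry back with count-1
-- (Python pops from the END of the list; the port therefore runs on output.reverse)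
def pvLoop (stack : List (Int × Int)) (total : Int) : Int :=
  match stack with
  | [] => total
  | (n, c) :: rest =>
    if 4 ≤ c ∧ c ≤ 6 then
      pvLoop ((n, c - 1) :: rest) (total + (if n = 1 then 1000 else 100 * n))
    else if c = 3 then
      pvLoop rest (total + (if n = 1 then 1000 else 100 * n))
    else if c = 2 then
      pvLoop ((n, 1) :: rest) (total + (if n = 1 then 100 else if n = 5 then 50 else 0))
    else if c = 1 then
      pvLoop rest (total + (if n = 1 then 100 else if n = 5 then 50 else 0))
    else
      pvLoop rest total
termination_by (stack.map pvWeight).sum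
decreasing_by
  all_goals simp [pvWeight]
  all_goals omega

def calculated_sub_alt (output : List (Int × Int)) (score : Int) : Int :=
  pvLoop output.reverse score

-- ===== PRECONDITION & SPEC =====
def Spec_calculated_sub (output : List (Int × Int)) (score : Int) (out : Int) : Prop := out = calculated_sub_alt output score
instance (output : List (Int × Int)) (score : Int) (out : Int) : Decidable (Spec_calculated_sub output score out) := by unfold Spec_calculated_sub; infer_instance

-- ===== CLAIM =====
def Claim_equal_calculated_sub : Prop := ∀ (output : List (Int × Int)) (score : Int), Dom_calculated_sub output score → Spec_calculated_sub output score (calculated_sub output score)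

-- ===== LEMMAS AND PROOFS =====

-- the payout A's cascade assigns to a single (face, count) entry
def pvEntry (n c : Int) : Int :=
  if c = 6 then if n = 1 then 4000 else n * 400
  else if c = 5 then if n = 1 then 3000 else n * 300
  else if c = 4 then if n = 1 then 2000 else n * 200
  else if c = 3 then if n = 1 then 1000 else n * 100
  else if c = 2 then if n = 1 then 200 else if n = 5 then 100 else 0
  else if c = 1 then if n = 1 then 100 else if n = 5 then 50 else 0
  else 0

lemma step_eq_entry (s : Int) (d : Int × Int) : pvStepA s d = s + pvEntry d.1 d.2 := by
  unfold pvStepA pvEntry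
  split_ifs <;> omega

-- peeling one die off a count-4..6 entry
lemma entry_high (n c : Int) (h4 : 4 ≤ c) (h6 : c ≤ 6) :
    pvEntry n c = (if n = 1 then 1000 else 100 * n) + pvEntry n (c - 1) := by
  interval_cases c <;> simp [pvEntry] <;> split_ifs <;> omega

-- peeling one die off a count-2 entry
lemma entry_two (n : Int) :
    pvEntry n 2 = (if n = 1 then 100 else if n = 5 then 50 else 0) + pvEntry n 1 := by
  simp [pvEntry]; split_ifs <;> omega

-- the stack loop computes total + the cascade payouts of all remaining entries
lemma pvLoop_eq (stack : List (Int × Int)) (total : Int) :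
    pvLoop stack total = total + (stack.map (fun d => pvEntry d.1 d.2)).sum := by
  fun_induction pvLoop stack total
  case case1 => simp
  case case2 =>
    rename_i h ih
    simp only [dite_eq_ite] at ih
    rw [ih]
    simp only [List.map_cons, List.sum_cons]
    rw [entry_high _ _ h.1 h.2]
    ring
  case case3 =>
    rename_i ih
    simp only [dite_eq_ite] at ih
    rw [ih]
    simp only [List.map_cons, List.sum_cons]
    simp [pvEntry]
    split_ifs <;> omega
  case case4 =>
    rename_i ih
    simp only [dite_eq_ite] at ih
    rw [ih]
    simp only [List.map_cons, List.sum_cons]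
    rw [entry_two]
    ring
  case case5 =>
    rename_i ih
    simp only [dite_eq_ite] at ih
    rw [ih]
    simp only [List.map_cons, List.sum_cons]
    simp [pvEntry]
    split_ifs <;> omega
  case case6 =>
    rename_i n c rest h1 h2 h3 h4 ih
    rw [ih]
    simp only [List.map_cons, List.sum_cons]
    have hz : pvEntry n c = 0 := by unfold pvEntry; split_ifs <;> omega
    rw [hz]
    ring

-- A's fold is score + the same per-entry payouts
lemma foldA_eq (output : List (Int × Int)) (score : Int) :
    calculated_sub output score = score + (output.map (fun d => pvEntry d.1 d.2)).sum := by
  induction output generalizing score with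
  | nil => simp [calculated_sub]
  | cons d t ih =>
    have h : calculated_sub (d :: t) score = calculated_sub t (pvStepA score d) := rfl
    rw [h, ih, step_eq_entry]
    simp only [List.map_cons, List.sum_cons]
    ring

-- ===== VERDICT =====
theorem calculated_sub_spec : Claim_equal_calculated_sub := by
  intro output score _
  unfold Spec_calculated_sub calculated_sub_alt
  rw [pvLoop_eq, foldA_eq, List.map_reverse, List.sum_reverse]
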